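-- pv_equiv track=rewrite | github.com/tylergneill/skrutable | src/skrutable/meter_identification.py | _decompose_into_mAtragaNas
-- ===== SOURCE A (Python) =====
-- def _decompose_into_mAtragaNas(weights_str, gana_6_morae, gana_8_morae):
-- 	"""
-- 	Decomposes an ardha (half-verse) weight string into mātrā-gaṇas.
-- 	Returns list of l/g substrings, one per gaṇa position (8 total).
-- 	gana_6_morae: 1 for upagīti-style 6th gaṇa (la), 4 for ja/kha.
-- 	gana_8_morae: 2 for standard final long, 4 for āryāgīti.
--
-- 	Fully greedy: consume syllables into each gaṇa until the running mora count
-- 	meets or exceeds the target, then stop. A perfect verse hits each target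
-- 	exactly and never overflows. An imperfect verse overflows at the gaṇa where
-- 	the syllable sequence diverges — making the specific problem visible to
-- 	validation. Gaṇa 8 takes all remaining syllables.
-- 	"""
-- 	ganas = []
-- 	i = 0
-- 	n = len(weights_str)
--
-- 	while i < n:
-- 		pos = len(ganas) + 1  # 1-indexed
--
-- 		if pos == 8:
-- 			ganas.append(weights_str[i:])
-- 			break
--
-- 		target = gana_6_morae if pos == 6 else 4
-- 		seg = ''
-- 		seg_morae = 0
-- 		while i < n and seg_morae < target:
-- 			s = weights_str[i]
-- 			seg += s
-- 			seg_morae += 1 if s == 'l' else 2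
-- 			i += 1
-- 		ganas.append(seg)
--
-- 	return ganas
-- ===== SOURCE B (Python) =====
-- def _decompose_into_mAtragaNas(weights_str, gana_6_morae, gana_8_morae):
-- 	"""
-- 	Prefix-sum formulation: precompute cumulative morae, then locate each
-- 	gaNa boundary with a binary search on the (strictly increasing) prefix
-- 	sums instead of walking syllable by syllable inside each gaNa.
-- 	"""
-- 	n = len(weights_str)
-- 	prefix = [0]
-- 	for ch in weights_str:
-- 		prefix.append(prefix[-1] + (1 if ch == 'l' else 2))
--
-- 	ganas = []
-- 	start = 0
-- 	for pos in range(1, 8):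
-- 		if start >= n:
-- 			return ganas
-- 		target = gana_6_morae if pos == 6 else 4
-- 		cut = min(_first_at_least(prefix, prefix[start] + target, start), n)
-- 		ganas.append(weights_str[start:cut])
-- 		start = cut
-- 	if start < n:
-- 		ganas.append(weights_str[start:])
-- 	return ganas
--
--
-- def _first_at_least(prefix, value, lo):
-- 	"""Least index >= lo with prefix[index] >= value, else len(prefix)."""
-- 	hi = len(prefix)
-- 	while lo < hi:
-- 		mid = (lo + hi) // 2
-- 		if prefix[mid] < value:
-- 			lo = mid + 1
-- 		else:
-- 			hi = mid
-- 	return lo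
-- ===== Notes on version B (the rewrite author's own statement) =====
-- stated objective: alternative
-- what changed: B precomputes a prefix-sum array of morae once and locates each gana boundary with a hand-written binary search on the strictly increasing prefix sums plus one slice, instead of A's nested while loops that grow each segment syllable by syllable via repeated string concatenation with a running mora counter.
import Mathlib
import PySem

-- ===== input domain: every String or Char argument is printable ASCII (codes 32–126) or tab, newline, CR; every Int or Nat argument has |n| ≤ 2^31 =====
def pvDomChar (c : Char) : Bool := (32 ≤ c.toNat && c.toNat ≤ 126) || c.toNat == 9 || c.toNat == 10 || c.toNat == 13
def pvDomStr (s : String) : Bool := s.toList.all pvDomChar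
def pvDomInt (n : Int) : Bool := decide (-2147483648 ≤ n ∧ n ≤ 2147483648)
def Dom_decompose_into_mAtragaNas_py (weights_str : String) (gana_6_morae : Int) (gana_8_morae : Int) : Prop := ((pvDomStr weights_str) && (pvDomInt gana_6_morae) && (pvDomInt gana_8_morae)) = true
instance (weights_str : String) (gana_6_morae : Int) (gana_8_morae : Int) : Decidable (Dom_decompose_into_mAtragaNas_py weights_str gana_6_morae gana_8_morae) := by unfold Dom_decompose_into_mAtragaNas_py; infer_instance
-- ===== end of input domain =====

-- B replaces A's syllable-by-syllable nested loops by a prefix-sum array plus a binary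
-- search per gana boundary (objective: alternative decomposition, same exact result).

-- mora weight of one character: 1 for 'l', 2 otherwise
def pvW (c : Char) : Int := if c = 'l' then 1 else 2

-- ===== PORT A =====
-- inner while loop: while i < n and seg_morae < target: consume one syllable
def pvInnerA (s : List Char) (target : Int) (i : Nat) (seg : List Char) (m : Int) :
    List Char × Nat :=
  if h : i < s.length ∧ m < target then
    pvInnerA s target (i + 1) (seg ++ [s[i]'h.1]) (m + pvW (s[i]'h.1))
  else
    (seg, i)
termination_by s.length - i
decreasing_by omega

-- outer while loop; the fuel argument only makes the recursion total: the loop body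
-- appends one gana per iteration and breaks at position 8, so fuel 8 is never exhausted
def pvOuterA (s : List Char) (g6 : Int) : Nat → Nat → List String → List String
  | 0, _, ganas => ganas
  | fuel + 1, i, ganas =>
    if i < s.length then
      if ganas.length + 1 = 8 then
        ganas ++ [String.mk (s.drop i)]
      else
        let target := if ganas.length + 1 = 6 then g6 else 4
        let p := pvInnerA s target i [] 0
        pvOuterA s g6 fuel p.2 (ganas ++ [String.mk p.1])
    else ganas

def decompose_into_mAtragaNas_py (weights_str : String) (gana_6_morae : Int) (gana_8_morae : Int) : List String :=
  pvOuterA weights_str.toList gana_6_morae 8 0 []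

-- ===== PORT B =====
-- prefix = [0]; for ch in weights_str: prefix.append(prefix[-1] + (1 if ch=='l' else 2))
def pvPrefB (acc : Int) : List Char → List Int
  | [] => [acc]
  | c :: cs => acc :: pvPrefB (acc + pvW c) cs

-- _first_at_least: binary search, indices stay in range so prefix[mid] is getD mid 0
def pvFal (p : List Int) (v : Int) (lo hi : Nat) : Nat :=
  if lo < hi then
    let mid := (lo + hi) / 2
    if p.getD mid 0 < v then pvFal p v (mid + 1) hi else pvFal p v lo mid
  else lo
termination_by hi - lo
decreasing_by all_goals omega

-- the for-loop over pos in range(1,8), with the early return and the trailing gana 8;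
-- weights_str[start:cut] with start ≤ cut ≤ n is exactly (drop start).take (cut-start)
def pvOuterB (s : List Char) (pref : List Int) (g6 : Int) : List Nat → Nat → List String → List String
  | [], start, ganas =>
    if start < s.length then ganas ++ [String.mk (s.drop start)] else ganas
  | pos :: rest, start, ganas =>
    if s.length ≤ start then ganas
    else
      let target := if pos = 6 then g6 else 4
      let cut := min (pvFal pref (pref.getD start 0 + target) start pref.length) s.length
      pvOuterB s pref g6 rest cut (ganas ++ [String.mk ((s.drop start).take (cut - start))])

def decompose_into_mAtragaNas_py_alt (weights_str : String) (gana_6_morae : Int) (gana_8_morae : Int) : List String :=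
  pvOuterB weights_str.toList (pvPrefB 0 weights_str.toList) gana_6_morae
    [1, 2, 3, 4, 5, 6, 7] 0 []

-- ===== PRECONDITION & SPEC =====
def Spec_decompose_into_mAtragaNas_py (weights_str : String) (gana_6_morae : Int) (gana_8_morae : Int) (out : List String) : Prop := out = decompose_into_mAtragaNas_py_alt weights_str gana_6_morae gana_8_morae
instance (weights_str : String) (gana_6_morae : Int) (gana_8_morae : Int) (out : List String) : Decidable (Spec_decompose_into_mAtragaNas_py weights_str gana_6_morae gana_8_morae out) := by unfold Spec_decompose_into_mAtragaNas_py; infer_instance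

-- ===== CLAIM (what is proved, stated in full; the proofs are below) =====
def Claim_equal_decompose_into_mAtragaNas_py : Prop := ∀ (weights_str : String) (gana_6_morae : Int) (gana_8_morae : Int), Dom_decompose_into_mAtragaNas_py weights_str gana_6_morae gana_8_morae → Spec_decompose_into_mAtragaNas_py weights_str gana_6_morae gana_8_morae (decompose_into_mAtragaNas_py weights_str gana_6_morae gana_8_morae)

-- ===== LEMMAS AND PROOFS =====

-- cumulative morae of the first j syllables
def pvSmor (s : List Char) (j : Nat) : Int := ((s.take j).map pvW).sum

lemma pvW_pos (c : Char) : 0 < pvW c := by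
  unfold pvW; split <;> norm_num

lemma pvSmor_succ (s : List Char) (j : Nat) (h : j < s.length) :
    pvSmor s (j + 1) = pvSmor s j + pvW (s[j]'h) := by
  unfold pvSmor
  have h' : j < (s.map pvW).length := by simpa using h
  rw [List.map_take, List.map_take, List.sum_take_succ _ _ h']
  simp

lemma pvSmor_le_succ (s : List Char) (j : Nat) : pvSmor s j ≤ pvSmor s (j + 1) := by
  by_cases h : j < s.length
  · rw [pvSmor_succ s j h]
    have := pvW_pos (s[j]'h); omega
  · unfold pvSmor
    rw [List.take_of_length_le (by omega), List.take_of_length_le (by omega)]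

lemma pvSmor_mono (s : List Char) {i j : Nat} (h : i ≤ j) : pvSmor s i ≤ pvSmor s j := by
  induction j with
  | zero =>
    have hi0 : i = 0 := by omega
    simp [hi0]
  | succ k ih =>
    rcases Nat.lt_or_ge i (k + 1) with hk | hk
    · exact le_trans (ih (by omega)) (pvSmor_le_succ s k)
    · have : i = k + 1 := by omega
      simp [this]

lemma pvPrefB_length (acc : Int) (s : List Char) : (pvPrefB acc s).length = s.length + 1 := by
  induction s generalizing acc with
  | nil => simp [pvPrefB]
  | cons c cs ih => simp [pvPrefB, ih]

lemma pvPrefB_getD (s : List Char) (acc : Int) (j : Nat) (hj : j ≤ s.length) :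
    (pvPrefB acc s).getD j 0 = acc + pvSmor s j := by
  induction s generalizing acc j with
  | nil =>
    have hj0 : j = 0 := by simpa using hj
    simp [hj0, pvPrefB, pvSmor]
  | cons c cs ih =>
    cases j with
    | zero => simp [pvPrefB, pvSmor]
    | succ k =>
      have hk : k ≤ cs.length := by simpa using hj
      simp only [pvPrefB, List.getD_cons_succ]
      rw [ih (acc + pvW c) k hk]
      unfold pvSmor
      simp [List.take_succ_cons]
      ring

-- binary search specification (on a list monotone on the searched range)
lemma pvFal_spec (p : List Int) (v : Int)
    (hmono : ∀ a b : Nat, a ≤ b → b < p.length → p.getD a 0 ≤ p.getD b 0) :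
    ∀ lo hi : Nat, lo ≤ hi → hi ≤ p.length →
      lo ≤ pvFal p v lo hi ∧ pvFal p v lo hi ≤ hi ∧
      (∀ k, lo ≤ k → k < pvFal p v lo hi → p.getD k 0 < v) ∧
      (pvFal p v lo hi < hi → v ≤ p.getD (pvFal p v lo hi) 0) := by
  intro lo hi
  induction hn : hi - lo using Nat.strong_induction_on generalizing lo hi with
  | _ n ih =>
    intro hlohi hhi
    unfold pvFal
    by_cases hlt : lo < hi
    · simp only [if_pos hlt]
      have hmid1 : lo ≤ (lo + hi) / 2 := by omega
      have hmid2 : (lo + hi) / 2 < hi := by omega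
      by_cases hc : p.getD ((lo + hi) / 2) 0 < v
      · simp only [if_pos hc]
        obtain ⟨h1, h2, h3, h4⟩ :=
          ih (hi - ((lo + hi) / 2 + 1)) (by omega) ((lo + hi) / 2 + 1) hi rfl (by omega) hhi
        refine ⟨by omega, h2, ?_, h4⟩
        intro k hk1 hk2
        rcases Nat.lt_or_ge k ((lo + hi) / 2 + 1) with hk | hk
        · exact lt_of_le_of_lt (hmono k ((lo + hi) / 2) (by omega) (by omega)) hc
        · exact h3 k hk hk2
      · simp only [if_neg hc]
        obtain ⟨h1, h2, h3, h4⟩ :=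
          ih ((lo + hi) / 2 - lo) (by omega) lo ((lo + hi) / 2) rfl (by omega) (by omega)
        refine ⟨h1, by omega, h3, ?_⟩
        intro hr
        rcases Nat.lt_or_ge (pvFal p v lo ((lo + hi) / 2)) ((lo + hi) / 2) with hr' | hr'
        · exact h4 hr'
        · have : pvFal p v lo ((lo + hi) / 2) = (lo + hi) / 2 := by omega
          rw [this]; omega
    · simp only [if_neg hlt]
      exact ⟨le_refl _, by omega, by intro k h1 h2; omega, by intro h; omega⟩

-- A's inner loop: the segment is the consumed slice and the stop index is
-- characterised by the running-mora condition
lemma pvInnerA_spec (s : List Char) (t : Int) :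
    ∀ i : Nat, i ≤ s.length → ∀ (seg : List Char) (m : Int),
      (pvInnerA s t i seg m).1 =
        seg ++ (s.drop i).take ((pvInnerA s t i seg m).2 - i) ∧
      i ≤ (pvInnerA s t i seg m).2 ∧ (pvInnerA s t i seg m).2 ≤ s.length ∧
      (∀ k, i ≤ k → k < (pvInnerA s t i seg m).2 → m + (pvSmor s k - pvSmor s i) < t) ∧
      ((pvInnerA s t i seg m).2 < s.length →
        t ≤ m + (pvSmor s (pvInnerA s t i seg m).2 - pvSmor s i)) := by
  intro i
  induction hn : s.length - i using Nat.strong_induction_on generalizing i with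
  | _ n ih =>
    intro hi seg m
    unfold pvInnerA
    by_cases h : i < s.length ∧ m < t
    · simp only [dif_pos h]
      obtain ⟨h1, h2, h3, h4, h5⟩ :=
        ih (s.length - (i + 1)) (by omega) (i + 1) rfl (by omega)
          (seg ++ [s[i]'h.1]) (m + pvW (s[i]'h.1))
      have hstep : pvSmor s (i + 1) = pvSmor s i + pvW (s[i]'h.1) := pvSmor_succ s i h.1
      refine ⟨?_, by omega, h3, ?_, ?_⟩
      · rw [h1]
        have hj := h2
        rw [List.drop_eq_getElem_cons h.1]
        have : (pvInnerA s t (i + 1) (seg ++ [s[i]'h.1]) (m + pvW (s[i]'h.1))).2 - i =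
            ((pvInnerA s t (i + 1) (seg ++ [s[i]'h.1]) (m + pvW (s[i]'h.1))).2 - (i + 1)) + 1 := by
          omega
        rw [this, List.take_succ_cons]
        simp
      · intro k hk1 hk2
        rcases Nat.lt_or_ge k (i + 1) with hk | hk
        · have : k = i := by omega
          subst this; simp; exact h.2
        · have := h4 k hk hk2
          omega
      · intro hlt
        have := h5 hlt
        omega
    · simp only [dif_neg h]
      refine ⟨by simp, le_refl _, hi, by intro k h1 h2; omega, ?_⟩
      intro hlt
      have : ¬ m < t := by tauto
      omega

-- the two boundary computations agree
lemma pvCut_eq (s : List Char) (t : Int) (i : Nat) (hi : i ≤ s.length) :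
    (pvInnerA s t i [] 0).2 =
      min (pvFal (pvPrefB 0 s) ((pvPrefB 0 s).getD i 0 + t) i (pvPrefB 0 s).length)
          s.length := by
  set p := pvPrefB 0 s with hp
  have hlen : p.length = s.length + 1 := pvPrefB_length 0 s
  have hgd : ∀ k : Nat, k ≤ s.length → p.getD k 0 = pvSmor s k := by
    intro k hk
    rw [hp, pvPrefB_getD s 0 k hk]; ring
  have hmono : ∀ a b : Nat, a ≤ b → b < p.length → p.getD a 0 ≤ p.getD b 0 := by
    intro a b hab hb
    rw [hgd a (by omega), hgd b (by omega)]
    exact pvSmor_mono s hab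
  set v := p.getD i 0 + t with hv
  obtain ⟨f1, f2, f3, f4⟩ := pvFal_spec p v hmono i p.length (by omega) (le_refl _)
  obtain ⟨_, a1, a2, a3, a4⟩ := pvInnerA_spec s t i hi [] 0
  set j := (pvInnerA s t i [] 0).2 with hj
  set r := pvFal p v i p.length with hr
  have hvv : v = pvSmor s i + t := by rw [hv, hgd i hi]
  -- j satisfies: ∀ k ∈ [i, j), Smor k < Smor i + t;  j < n → Smor j ≥ Smor i + t
  rcases Nat.lt_or_ge r (s.length + 1) with hrn | hrn
  · -- r ≤ n, so p[r] ≥ v and min r n = r (need r ≤ n)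
    have hrle : r ≤ s.length := by omega
    have hpr : v ≤ pvSmor s r := by
      have := f4 (by omega)
      rwa [hgd r hrle] at this
    have hjr : j = r := by
      rcases Nat.lt_trichotomy j r with hlt | heq | hgt
      · -- j < r ≤ n: f3 gives Smor j < v, a4 gives Smor j ≥ v (j < n)
        have hjn : j < s.length := by omega
        have h1 := f3 j a1 hlt
        rw [hgd j (by omega)] at h1
        have h2 := a4 hjn
        rw [hvv] at h1; omega
      · exact heq
      · -- r < j: a3 gives Smor r < Smor i + t, contradicting hpr
        have h1 := a3 r f1 hgt
        rw [hvv] at hpr; omega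
    omega
  · -- r = n + 1: every prefix value < v, so j = n and min r n = n
    have hrn' : r = s.length + 1 := by omega
    have hjn : j = s.length := by
      rcases Nat.lt_or_ge j s.length with hlt | hge
      · have h1 := f3 j a1 (by omega)
        rw [hgd j (by omega)] at h1
        have h2 := a4 hlt
        rw [hvv] at h1; omega
      · omega
    omega

-- the main outer correspondence
lemma pvOuter_eq (s : List Char) (g6 : Int) :
    ∀ (rest : List Nat) (i : Nat) (ganas : List String),
      i ≤ s.length → ganas.length + rest.length = 7 →
      rest = List.range' (ganas.length + 1) rest.length →
      pvOuterA s g6 (rest.length + 1) i ganas =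
        pvOuterB s (pvPrefB 0 s) g6 rest i ganas := by
  intro rest
  induction rest with
  | nil =>
    intro i ganas hi hlen _
    simp only [List.length_nil] at hlen
    have h8 : ganas.length = 7 := by omega
    simp only [List.length_nil, pvOuterA, pvOuterB, h8]
    by_cases hin : i < s.length
    · simp [hin]
    · simp [hin]
  | cons pos rest' ih =>
    intro i ganas hi hlen hrange
    have hlen' : ganas.length + rest'.length = 6 := by
      simp only [List.length_cons] at hlen; omega
    have hcons := hrange
    rw [List.length_cons, List.range'_succ] at hcons
    have hpos : pos = ganas.length + 1 ∧ rest' = List.range' (ganas.length + 2) rest'.length := by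
      obtain ⟨hp1, hp2⟩ := List.cons_eq_cons.mp hcons
      exact ⟨hp1, by simpa [Nat.add_assoc] using hp2⟩
    simp only [List.length_cons]
    show pvOuterA s g6 (rest'.length + 1 + 1) i ganas = _
    unfold pvOuterA pvOuterB
    by_cases hin : i < s.length
    · have hne8 : ¬ ganas.length + 1 = 8 := by omega
      simp only [if_pos hin, if_neg hne8, if_neg (by omega : ¬ s.length ≤ i)]
      have htgt : (if ganas.length + 1 = 6 then g6 else 4) = (if pos = 6 then g6 else 4) := by
        rw [hpos.1]
      set t := if pos = 6 then g6 else (4 : Int) with ht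
      rw [htgt]
      obtain ⟨hf, hle1, hle2, _, _⟩ := pvInnerA_spec s t i (by omega) [] 0
      have hcut := pvCut_eq s t i (by omega)
      set cut := min (pvFal (pvPrefB 0 s) ((pvPrefB 0 s).getD i 0 + t) i (pvPrefB 0 s).length)
          s.length with hcutdef
      have hseg : (pvInnerA s t i [] 0).1 = (s.drop i).take (cut - i) := by
        rw [hf, ← hcut]; simp
      rw [show (pvInnerA s t i [] 0).2 = cut from hcut, hseg]
      exact ih cut (ganas ++ [String.mk ((s.drop i).take (cut - i))])
        (by omega) (by simp; omega) (by simpa using hpos.2)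
    · simp [hin, if_pos (by omega : s.length ≤ i)]

-- ===== VERDICT (by name: the statement is the Claim_ definition above) =====
theorem decompose_into_mAtragaNas_py_spec : Claim_equal_decompose_into_mAtragaNas_py := by
  intro ws g6 g8 _
  show decompose_into_mAtragaNas_py ws g6 g8 = decompose_into_mAtragaNas_py_alt ws g6 g8
  unfold decompose_into_mAtragaNas_py decompose_into_mAtragaNas_py_alt
  have := pvOuter_eq ws.toList g6 [1, 2, 3, 4, 5, 6, 7] 0 [] (by omega) (by simp) (by decide)
  simpa using this
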